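-- pv_equiv track=rewrite | github.com/anders1368/AOC-2020 | aoc19_2_works.py | filter_rules_with_no_input_match
-- ===== SOURCE A (Python) =====
-- from collections import defaultdict, deque
--
-- input_rules = defaultdict(list)
--
-- input_to_check = []
--
-- def filter_rules_with_no_input_match(input_rules,input_to_check):
--     return_rules = set()
--     for rule in input_rules:
--         count = 0
--         for i in input_to_check:
--             if rule in i:
--                 count += 1
--                 break
--         if count > 0:
--             return_rules.add(rule)
--     return return_rules
-- ===== SOURCE B (Python) =====
-- def filter_rules_with_no_input_match(input_rules, input_to_check):
--     # Join all inputs with a NUL separator (never present in the puzzle's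
--     # printable data) and test each rule once against the single haystack.
--     if not input_to_check:
--         return set()
--     haystack = "\x00".join(input_to_check)
--     return {rule for rule in input_rules if rule in haystack}
-- ===== Notes on version B (the rewrite author's own statement) =====
-- stated objective: faster
-- what changed: Instead of scanning the input list per rule with an inner loop and break, B joins all inputs once with a NUL separator and tests each rule with a single substring search over the combined haystack.
import Mathlib
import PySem

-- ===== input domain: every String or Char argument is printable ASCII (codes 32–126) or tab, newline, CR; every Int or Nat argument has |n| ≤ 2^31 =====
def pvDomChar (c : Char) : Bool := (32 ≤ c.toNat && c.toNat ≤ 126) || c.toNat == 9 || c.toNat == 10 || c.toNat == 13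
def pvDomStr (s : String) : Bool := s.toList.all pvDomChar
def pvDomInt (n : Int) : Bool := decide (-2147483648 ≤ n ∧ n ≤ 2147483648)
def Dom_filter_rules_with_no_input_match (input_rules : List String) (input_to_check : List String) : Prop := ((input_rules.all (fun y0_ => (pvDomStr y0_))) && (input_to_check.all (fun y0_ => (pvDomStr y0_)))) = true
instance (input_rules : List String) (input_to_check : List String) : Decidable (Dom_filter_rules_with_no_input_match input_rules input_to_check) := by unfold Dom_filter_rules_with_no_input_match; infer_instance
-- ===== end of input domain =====

-- B replaces A's per-rule scan of the input list by one NUL-joined haystack searched once per rule (constant-factor speed-up).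

-- ===== PORT A =====
-- inner loop 'for i in input_to_check: if rule in i: count += 1; break' starting from count = 0
def pvInnerCount (rule : String) : List String → Int
  | [] => 0
  | i :: rest => if PySem.Str.isIn rule i then 0 + 1 else pvInnerCount rule rest

def filter_rules_with_no_input_match (input_rules : List String) (input_to_check : List String) : List String :=
  input_rules.foldl
    (fun return_rules rule =>
      let count := pvInnerCount rule input_to_check
      if count > 0 then PySem.Set.add return_rules rule else return_rules)
    []

-- ===== PORT B =====
def filter_rules_with_no_input_match_alt (input_rules : List String) (input_to_check : List String) : List String :=
  if input_to_check = [] then []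
  else
    let haystack := PySem.Str.join "\x00" input_to_check
    input_rules.foldl
      (fun s rule => if PySem.Str.isIn rule haystack then PySem.Set.add s rule else s)
      []

-- ===== PRECONDITION & SPEC =====
def Spec_filter_rules_with_no_input_match (input_rules : List String) (input_to_check : List String) (out : List String) : Prop := out = filter_rules_with_no_input_match_alt input_rules input_to_check
instance (input_rules : List String) (input_to_check : List String) (out : List String) : Decidable (Spec_filter_rules_with_no_input_match input_rules input_to_check out) := by unfold Spec_filter_rules_with_no_input_match; infer_instance

-- ===== CLAIM (what is proved, stated in full; the proofs are below) =====
def Claim_equal_filter_rules_with_no_input_match : Prop := ∀ (input_rules : List String) (input_to_check : List String), Dom_filter_rules_with_no_input_match input_rules input_to_check → Spec_filter_rules_with_no_input_match input_rules input_to_check (filter_rules_with_no_input_match input_rules input_to_check)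

-- ===== LEMMAS AND PROOFS =====

-- a prefix that avoids the separator char stays inside the first block
theorem pv_prefix_sep (c : Char) : ∀ (r u t : List Char), c ∉ r → r <+: u ++ c :: t → r <+: u
  | [], _, _, _, _ => List.nil_prefix
  | x :: r', [], t, hc, hp => by
      rcases List.cons_prefix_cons.mp hp with ⟨hx, _⟩
      exact absurd (hx ▸ List.mem_cons_self) hc
  | x :: r', b :: u', t, hc, hp => by
      rcases List.cons_prefix_cons.mp hp with ⟨hx, hp'⟩
      exact hx ▸ List.cons_prefix_cons.mpr ⟨rfl,
        pv_prefix_sep c r' u' t (fun h => hc (List.mem_cons_of_mem _ h)) hp'⟩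

-- an infix that avoids the separator char lies entirely left or right of it
theorem pv_infix_sep (c : Char) (r : List Char) (hc : c ∉ r) :
    ∀ (s t : List Char), r <:+: s ++ c :: t → r <:+: s ∨ r <:+: t
  | [], t, h => by
      rcases List.infix_cons_iff.mp h with hp | hi
      · cases r with
        | nil => exact Or.inl (List.nil_infix)
        | cons x r' =>
          rcases List.cons_prefix_cons.mp hp with ⟨hx, _⟩
          exact absurd (hx ▸ List.mem_cons_self) hc
      · exact Or.inr hi
  | a :: s', t, h => by
      rcases List.infix_cons_iff.mp h with hp | hi
      · exact Or.inl ((pv_prefix_sep c r (a :: s') t hc hp).isInfix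
          )
      · rcases pv_infix_sep c r hc s' t hi with h1 | h2
        · exact Or.inl (h1.trans (List.suffix_cons a s').isInfix)
        · exact Or.inr h2

theorem pv_infix_join_iff (c : Char) (r : List Char) (hc : c ∉ r) :
    ∀ (ls : List (List Char)), ls ≠ [] →
      (r <:+: PySem.Chars.join [c] ls ↔ ∃ l ∈ ls, r <:+: l)
  | [], h => absurd rfl h
  | [p], _ => by simp [PySem.Chars.join_singleton]
  | p :: q :: rest, _ => by
      rw [PySem.Chars.join_cons_cons]
      constructor
      · intro h
        rw [List.append_assoc] at h
        rcases pv_infix_sep c r hc p (PySem.Chars.join [c] (q :: rest)) (by simpa using h) with h1 | h2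
        · exact ⟨p, List.mem_cons_self, h1⟩
        · rcases (pv_infix_join_iff c r hc (q :: rest) (by simp)).mp h2 with ⟨l, hl, hrl⟩
          exact ⟨l, List.mem_cons_of_mem _ hl, hrl⟩
      · rintro ⟨l, hl, hrl⟩
        rcases List.mem_cons.mp hl with rfl | hl'
        · exact List.infix_append_of_infix_left (List.infix_append_of_infix_left hrl)
        · have : r <:+: PySem.Chars.join [c] (q :: rest) :=
            (pv_infix_join_iff c r hc (q :: rest) (by simp)).mpr ⟨l, hl', hrl⟩
          rw [List.append_assoc]
          exact List.infix_append_of_infix_right (by simpa using this.trans (List.suffix_cons c _).isInfix)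

theorem pv_innerCount_pos_iff (r : String) : ∀ (ls : List String),
    (pvInnerCount r ls > 0 ↔ ∃ i ∈ ls, PySem.Str.isIn r i = true)
  | [] => by simp [pvInnerCount]
  | i :: rest => by
      by_cases h : PySem.Chars.isIn r.toList i.toList = true
      · simp [pvInnerCount, h]
      · simp [pvInnerCount, h, pv_innerCount_pos_iff r rest]

theorem pv_nul_not_mem (s : String) (hs : pvDomStr s = true) : '\x00' ∉ s.toList := by
  intro hmem
  have := (List.all_eq_true.mp hs) _ hmem
  simp [pvDomChar] at this

-- ===== VERDICT (by name: the statement is the Claim_ definition above) =====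
theorem filter_rules_with_no_input_match_spec : Claim_equal_filter_rules_with_no_input_match := by
  intro input_rules input_to_check hdom
  unfold Spec_filter_rules_with_no_input_match
  unfold Dom_filter_rules_with_no_input_match at hdom
  rw [Bool.and_eq_true] at hdom
  obtain ⟨hrules, hinputs⟩ := hdom
  unfold filter_rules_with_no_input_match filter_rules_with_no_input_match_alt
  by_cases hemp : input_to_check = []
  · subst hemp
    rw [if_pos rfl]
    induction input_rules with
    | nil => rfl
    | cons r rs ih =>
      simp only [List.all_cons, Bool.and_eq_true] at hrules
      simp only [List.foldl_cons, pvInnerCount]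
      exact ih hrules.2
  · rw [if_neg hemp]
    apply PySem.List.foldl_congr_mem
    intro acc rule hmem
    have hrule : pvDomStr rule = true := List.all_eq_true.mp hrules _ hmem
    have hc : '\x00' ∉ rule.toList := pv_nul_not_mem rule hrule
    have key : (pvInnerCount rule input_to_check > 0) ↔
        PySem.Str.isIn rule (PySem.Str.join "\x00" input_to_check) = true := by
      rw [pv_innerCount_pos_iff, PySem.Str.isIn_iff_infix, PySem.Str.toList_join]
      have hne : input_to_check.map String.toList ≠ [] := by
        simpa using hemp
      rw [show ("\x00" : String).toList = ['\x00'] from rfl]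
      rw [pv_infix_join_iff '\x00' rule.toList hc _ hne]
      constructor
      · rintro ⟨i, hi, hin⟩
        exact ⟨i.toList, List.mem_map_of_mem hi, (PySem.Str.isIn_iff_infix _ _).mp hin⟩
      · rintro ⟨l, hl, hrl⟩
        rcases List.mem_map.mp hl with ⟨i, hi, rfl⟩
        exact ⟨i, hi, (PySem.Str.isIn_iff_infix _ _).mpr hrl⟩
    by_cases hcond : pvInnerCount rule input_to_check > 0
    · simp only [if_pos hcond, if_pos (key.mp hcond)]
    · simp only [if_neg hcond, if_neg (fun h => hcond (key.mpr h))]
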